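-- pv_equiv track=rewrite | github.com/Perruccio/advent-of-code | advent_of_code/year2022/day15/solution.py | find_empty_by_y
-- ===== SOURCE A (Python) =====
-- def manhattan_distance(a, b):
--     return sum(abs(ca - cb) for ca, cb in zip(a, b))
--
-- def find_empty_by_y(data, y):
--     res = set()
--     beacon_in_y = set()
--     for sensor, beacon in data:
--         xs, ys = sensor
--         xb, yb = beacon
--         dist_sb = manhattan_distance(sensor, beacon)
--         dist_sy = manhattan_distance(sensor, (xs, y))
--         delta = dist_sb - dist_sy
--         res.update(xs + dx for dx in range(-delta, delta + 1))
--         if yb == y: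
--             beacon_in_y.add(xb)
--     return res, beacon_in_y
-- ===== SOURCE B (Python) =====
-- def find_empty_by_y(data, y):
--     # Interval subtraction: each sensor's coverage segment minus all earlier
--     # segments yields only the NEW x's, so no per-element membership tests.
--     def subtract(seg, cut):
--         a, b = seg
--         c, d = cut
--         out = []
--         if a <= min(b, c - 1):
--             out.append((a, min(b, c - 1)))
--         if max(a, d + 1) <= b:
--             out.append((max(a, d + 1), b))
--         return out
--
--     res = []
--     seen = []
--     beacon_in_y = set()
--     for (sx, sy), (bx, by) in data:
--         if by == y:
--             beacon_in_y.add(bx)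
--         delta = abs(sx - bx) + abs(sy - by) - abs(sy - y)
--         if delta >= 0:
--             segs = [(sx - delta, sx + delta)]
--             for cut in seen:
--                 segs = [p for s in segs for p in subtract(s, cut)]
--             for a, b in segs:
--                 res.extend(range(a, b + 1))
--             seen.append((sx - delta, sx + delta))
--     return set(res), beacon_in_y
-- ===== Notes on version B (the rewrite author's own statement) =====
-- stated objective: alternative
-- what changed: A unions every covered x of every sensor into a hash set element by element; B subtracts each sensor's coverage interval from the earlier sensors' intervals (interval arithmetic) and emits only the genuinely new x's, so no per-element membership tests are performed.
import Mathlib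
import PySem

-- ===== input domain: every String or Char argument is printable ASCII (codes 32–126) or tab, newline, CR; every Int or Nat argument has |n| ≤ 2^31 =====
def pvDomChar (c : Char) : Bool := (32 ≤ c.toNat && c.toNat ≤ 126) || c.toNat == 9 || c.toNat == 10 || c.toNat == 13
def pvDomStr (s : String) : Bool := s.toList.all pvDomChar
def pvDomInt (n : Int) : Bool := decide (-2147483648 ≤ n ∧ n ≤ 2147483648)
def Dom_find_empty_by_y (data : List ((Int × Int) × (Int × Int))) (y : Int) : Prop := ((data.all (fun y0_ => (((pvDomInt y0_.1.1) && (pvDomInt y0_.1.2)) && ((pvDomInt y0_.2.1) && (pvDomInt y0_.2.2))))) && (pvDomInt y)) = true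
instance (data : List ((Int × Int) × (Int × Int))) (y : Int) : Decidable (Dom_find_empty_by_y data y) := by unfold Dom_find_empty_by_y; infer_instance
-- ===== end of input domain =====

-- B replaces A's per-element set union (O(sum of coverage widths) membership work) by interval
-- subtraction against the earlier sensors' segments, emitting only the new x's of each sensor.

-- ===== PORT A =====
def manhattan (a b : Int × Int) : Int :=
  ([(a.1, b.1), (a.2, b.2)].map (fun p => |p.1 - p.2|)).sum

def find_empty_by_y (data : List ((Int × Int) × (Int × Int))) (y : Int) : List Int × List Int :=
  data.foldl (fun st sb =>
    let xs := sb.1.1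
    let yb := sb.2.2
    let dist_sb := manhattan sb.1 sb.2
    let dist_sy := manhattan sb.1 (xs, y)
    let delta := dist_sb - dist_sy
    let res := PySem.Set.update st.1 ((PySem.List.pyRange (-delta) (delta + 1) 1).map (fun dx => xs + dx))
    let beacon_in_y := if yb = y then PySem.Set.add st.2 sb.2.1 else st.2
    (res, beacon_in_y)) (PySem.Set.empty, PySem.Set.empty)

-- ===== PORT B =====
def pySubtract (seg cut : Int × Int) : List (Int × Int) :=
  (if seg.1 ≤ min seg.2 (cut.1 - 1) then [(seg.1, min seg.2 (cut.1 - 1))] else []) ++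
  (if max seg.1 (cut.2 + 1) ≤ seg.2 then [(max seg.1 (cut.2 + 1), seg.2)] else [])

def find_empty_by_y_alt (data : List ((Int × Int) × (Int × Int))) (y : Int) : List Int × List Int :=
  let st := data.foldl (fun (st : List Int × List (Int × Int) × PySem.Set Int) sb =>
    let sx := sb.1.1
    let sy := sb.1.2
    let bx := sb.2.1
    let b_y := sb.2.2
    let beac := if b_y = y then PySem.Set.add st.2.2 bx else st.2.2
    let delta := |sx - bx| + |sy - b_y| - |sy - y|
    if 0 ≤ delta then
      let segs := st.2.1.foldl (fun segs cut => segs.flatMap (fun s => pySubtract s cut))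
                    [(sx - delta, sx + delta)]
      (st.1 ++ segs.flatMap (fun s => PySem.List.pyRange s.1 (s.2 + 1) 1),
       st.2.1 ++ [(sx - delta, sx + delta)], beac)
    else (st.1, st.2.1, beac)) ([], [], PySem.Set.empty)
  (PySem.Set.ofList st.1, st.2.2)

-- ===== PRECONDITION & SPEC =====
def Spec_find_empty_by_y (data : List ((Int × Int) × (Int × Int))) (y : Int) (out : List Int × List Int) : Prop := out = find_empty_by_y_alt data y
instance (data : List ((Int × Int) × (Int × Int))) (y : Int) (out : List Int × List Int) : Decidable (Spec_find_empty_by_y data y out) := by unfold Spec_find_empty_by_y; infer_instance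

-- ===== CLAIM (what is proved, stated in full; the proofs are below) =====
def Claim_equal_find_empty_by_y : Prop := ∀ (data : List ((Int × Int) × (Int × Int))) (y : Int), Dom_find_empty_by_y data y → Spec_find_empty_by_y data y (find_empty_by_y data y)

-- ===== LEMMAS AND PROOFS =====

-- the integers covered by a list of segments, in list order
def ints (segs : List (Int × Int)) : List Int :=
  segs.flatMap (fun s => PySem.List.pyRange s.1 (s.2 + 1) 1)

lemma mem_ints (segs : List (Int × Int)) (x : Int) :
    x ∈ ints segs ↔ ∃ s ∈ segs, s.1 ≤ x ∧ x ≤ s.2 := by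
  simp [ints, List.mem_flatMap, PySem.List.mem_pyRange_one]

lemma mem_ints_pySubtract (s cut : Int × Int) (x : Int) :
    x ∈ ints (pySubtract s cut) ↔ (s.1 ≤ x ∧ x ≤ s.2) ∧ ¬(cut.1 ≤ x ∧ x ≤ cut.2) := by
  simp only [pySubtract, ints]
  split_ifs <;> simp [PySem.List.mem_pyRange_one] <;> omega

def SegsOK (segs : List (Int × Int)) : Prop :=
  (∀ s ∈ segs, s.1 ≤ s.2) ∧ segs.Pairwise (fun s t => s.2 < t.1)

lemma pySubtract_bounds (s cut : Int × Int) :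
    ∀ p ∈ pySubtract s cut, s.1 ≤ p.1 ∧ p.1 ≤ p.2 ∧ p.2 ≤ s.2 := by
  intro p hp
  simp only [pySubtract, List.mem_append] at hp
  rcases hp with hp | hp <;> split_ifs at hp with h <;>
    simp only [List.mem_singleton, List.not_mem_nil] at hp <;>
    first
    | exact absurd hp (by simp)
    | (subst hp; refine ⟨by omega, by omega, by omega⟩)

lemma pySubtract_pairwise (s cut : Int × Int) (hcut : cut.1 ≤ cut.2) :
    (pySubtract s cut).Pairwise (fun a b => a.2 < b.1) := by
  simp only [pySubtract]
  split_ifs with h1 h2 <;> simp <;> try omega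

lemma segsOK_flatMap (segs : List (Int × Int)) (cut : Int × Int) (hcut : cut.1 ≤ cut.2) (h : SegsOK segs) :
    SegsOK (segs.flatMap (fun s => pySubtract s cut)) := by
  obtain ⟨hne, hpw⟩ := h
  induction segs with
  | nil => exact ⟨by simp, by simp⟩
  | cons s rest ih =>
    rw [List.pairwise_cons] at hpw
    have ihr := ih (fun t ht => hne t (List.mem_cons_of_mem _ ht)) hpw.2
    refine ⟨?_, ?_⟩
    · intro p hp
      rw [List.flatMap_cons, List.mem_append] at hp
      rcases hp with hp | hp
      · exact (pySubtract_bounds s cut p hp).2.1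
      · exact ihr.1 p hp
    · rw [List.flatMap_cons]
      rw [List.pairwise_append]
      refine ⟨pySubtract_pairwise s cut hcut, ihr.2, ?_⟩
      intro p hp q hq
      rw [List.mem_flatMap] at hq
      obtain ⟨t, ht, hqt⟩ := hq
      have h1 := pySubtract_bounds s cut p hp
      have h2 := pySubtract_bounds t cut q hqt
      have h3 := hpw.1 t ht
      omega

lemma segsOK_foldl (cuts : List (Int × Int)) (segs : List (Int × Int))
    (hcuts : ∀ c ∈ cuts, c.1 ≤ c.2) (h : SegsOK segs) :
    SegsOK (cuts.foldl (fun segs cut => segs.flatMap (fun s => pySubtract s cut)) segs) := by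
  induction cuts generalizing segs with
  | nil => exact h
  | cons c cs ih =>
    exact ih _ (fun d hd => hcuts d (List.mem_cons_of_mem _ hd))
      (segsOK_flatMap segs c (hcuts c (by simp)) h)

lemma pairwise_ints (segs : List (Int × Int)) (h : SegsOK segs) :
    (ints segs).Pairwise (· < ·) := by
  obtain ⟨hne, hpw⟩ := h
  induction segs with
  | nil => simp [ints]
  | cons s rest ih =>
    rw [List.pairwise_cons] at hpw
    have ihr := ih (fun t ht => hne t (List.mem_cons_of_mem _ ht)) hpw.2
    show (PySem.List.pyRange s.1 (s.2 + 1) 1 ++ ints rest).Pairwise (· < ·)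
    rw [List.pairwise_append]
    refine ⟨PySem.List.pairwise_lt_pyRange_one _ _, ihr, ?_⟩
    intro a ha b hb
    rw [PySem.List.mem_pyRange_one] at ha
    rw [mem_ints] at hb
    obtain ⟨t, ht, hbt⟩ := hb
    have := hpw.1 t ht
    omega

lemma ints_flatMap (l : List (Int × Int)) (f : Int × Int → List (Int × Int)) :
    ints (l.flatMap f) = l.flatMap (fun s => ints (f s)) := by
  simp [ints, List.flatMap_assoc]

lemma mem_ints_foldl (cuts : List (Int × Int)) (segs : List (Int × Int)) (x : Int) :
    x ∈ ints (cuts.foldl (fun segs cut => segs.flatMap (fun s => pySubtract s cut)) segs) ↔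
      x ∈ ints segs ∧ ∀ c ∈ cuts, ¬(c.1 ≤ x ∧ x ≤ c.2) := by
  induction cuts generalizing segs with
  | nil => simp
  | cons c cs ih =>
    rw [List.foldl_cons, ih]
    have hstep : x ∈ ints (segs.flatMap fun s => pySubtract s c) ↔
        x ∈ ints segs ∧ ¬(c.1 ≤ x ∧ x ≤ c.2) := by
      rw [ints_flatMap]
      rw [List.mem_flatMap]
      constructor
      · rintro ⟨s, hs, hx⟩
        rw [mem_ints_pySubtract] at hx
        exact ⟨(mem_ints segs x).2 ⟨s, hs, hx.1⟩, hx.2⟩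
      · rintro ⟨hx, hc⟩
        obtain ⟨s, hs, hsx⟩ := (mem_ints segs x).1 hx
        exact ⟨s, hs, (mem_ints_pySubtract s c x).2 ⟨hsx, hc⟩⟩
    rw [hstep]
    constructor
    · rintro ⟨⟨h1, h2⟩, h3⟩
      refine ⟨h1, ?_⟩
      intro d hd
      rcases List.mem_cons.1 hd with h | h
      · subst h; exact h2
      · exact h3 d h
    · rintro ⟨h1, h2⟩
      exact ⟨⟨h1, h2 c (by simp)⟩, fun d hd => h2 d (List.mem_cons_of_mem _ hd)⟩

lemma eq_of_mem_pairwise (l1 l2 : List Int) (h1 : l1.Pairwise (· < ·))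
    (h2 : l2.Pairwise (· < ·)) (hm : ∀ x, x ∈ l1 ↔ x ∈ l2) : l1 = l2 := by
  have n1 : l1.Nodup := h1.imp (fun h => ne_of_lt h)
  have n2 : l2.Nodup := h2.imp (fun h => ne_of_lt h)
  have hp : l1.Perm l2 := (List.perm_ext_iff_of_nodup n1 n2).2 hm
  have e1 := PySem.List.sorted_eq_of_perm_of_pairwise_lt (xs := l2) (ys := l1)
    (key := fun x => x) hp h1
  have e2 := PySem.List.sorted_eq_of_perm_of_pairwise_lt (xs := l2) (ys := l2)
    (key := fun x => x) (List.Perm.refl _) h2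
  rw [← e1]
  exact e2

lemma map_add_pyRange (sx d : Int) :
    (PySem.List.pyRange (-d) (d + 1) 1).map (fun dx => sx + dx) =
      PySem.List.pyRange (sx - d) (sx + d + 1) 1 := by
  rw [PySem.List.pyRange_one, PySem.List.pyRange_one, List.map_map]
  have he : (d + 1 - -d) = (sx + d + 1 - (sx - d)) := by ring
  rw [he]
  apply List.map_congr_left
  intro k _
  simp [Function.comp]
  ring

lemma step_lists (res : List Int) (seen : List (Int × Int)) (lo hi : Int) (hlohi : lo ≤ hi)
    (hseen : ∀ c ∈ seen, c.1 ≤ c.2)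
    (hmem : ∀ x, x ∈ res ↔ ∃ c ∈ seen, c.1 ≤ x ∧ x ≤ c.2) :
    (PySem.List.pyRange lo (hi + 1) 1).filter (fun x => !(PySem.Set.contains res x)) =
      ints (seen.foldl (fun segs cut => segs.flatMap (fun s => pySubtract s cut)) [(lo, hi)]) := by
  apply eq_of_mem_pairwise
  · exact (PySem.List.pairwise_lt_pyRange_one _ _).filter _
  · apply pairwise_ints
    exact segsOK_foldl _ _ hseen ⟨by simpa using hlohi, by simp⟩
  · intro x
    rw [mem_ints_foldl, List.mem_filter, PySem.List.mem_pyRange_one]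
    have hc : (!(PySem.Set.contains res x)) = true ↔ ¬ x ∈ res := by
      simp
    rw [hc, hmem x, mem_ints]
    constructor
    · rintro ⟨⟨ha, hb⟩, hn⟩
      refine ⟨⟨(lo, hi), by simp, ha, by omega⟩, ?_⟩
      intro c hcs hcx
      exact hn ⟨c, hcs, hcx⟩
    · rintro ⟨⟨s, hs, hsx⟩, hn⟩
      rw [List.mem_singleton] at hs
      subst hs
      refine ⟨⟨hsx.1, by omega⟩, ?_⟩
      rintro ⟨c, hcs, hcx⟩
      exact hn c hcs hcx

-- the two step functions of the ports, named for the induction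
def AStep (y : Int) (st : List Int × List Int) (sb : (Int × Int) × (Int × Int)) :
    List Int × List Int :=
  let xs := sb.1.1
  let yb := sb.2.2
  let dist_sb := manhattan sb.1 sb.2
  let dist_sy := manhattan sb.1 (xs, y)
  let delta := dist_sb - dist_sy
  let res := PySem.Set.update st.1 ((PySem.List.pyRange (-delta) (delta + 1) 1).map (fun dx => xs + dx))
  let beacon_in_y := if yb = y then PySem.Set.add st.2 sb.2.1 else st.2
  (res, beacon_in_y)

def BStep (y : Int) (st : List Int × List (Int × Int) × PySem.Set Int)
    (sb : (Int × Int) × (Int × Int)) : List Int × List (Int × Int) × PySem.Set Int :=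
  let sx := sb.1.1
  let sy := sb.1.2
  let bx := sb.2.1
  let b_y := sb.2.2
  let beac := if b_y = y then PySem.Set.add st.2.2 bx else st.2.2
  let delta := |sx - bx| + |sy - b_y| - |sy - y|
  if 0 ≤ delta then
    let segs := st.2.1.foldl (fun segs cut => segs.flatMap (fun s => pySubtract s cut))
                  [(sx - delta, sx + delta)]
    (st.1 ++ segs.flatMap (fun s => PySem.List.pyRange s.1 (s.2 + 1) 1),
     st.2.1 ++ [(sx - delta, sx + delta)], beac)
  else (st.1, st.2.1, beac)

def InvB (st : List Int × List (Int × Int) × PySem.Set Int) : Prop :=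
  st.1.Nodup ∧ (∀ x, x ∈ st.1 ↔ ∃ c ∈ st.2.1, c.1 ≤ x ∧ x ≤ c.2) ∧ ∀ c ∈ st.2.1, c.1 ≤ c.2

lemma step_ok (y : Int) (sb : (Int × Int) × (Int × Int))
    (st : List Int × List (Int × Int) × PySem.Set Int) (h : InvB st) :
    AStep y (st.1, st.2.2) sb = ((BStep y st sb).1, (BStep y st sb).2.2) ∧
      InvB (BStep y st sb) := by
  obtain ⟨hnd, hmem, hseen⟩ := h
  have hdelta : manhattan sb.1 sb.2 - manhattan sb.1 (sb.1.1, y) =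
      |sb.1.1 - sb.2.1| + |sb.1.2 - sb.2.2| - |sb.1.2 - y| := by
    simp [manhattan]
  by_cases hd : 0 ≤ |sb.1.1 - sb.2.1| + |sb.1.2 - sb.2.2| - |sb.1.2 - y|
  case pos =>
    set d := |sb.1.1 - sb.2.1| + |sb.1.2 - sb.2.2| - |sb.1.2 - y| with hddef
    have hA : AStep y (st.1, st.2.2) sb =
        (PySem.Set.update st.1 (PySem.List.pyRange (sb.1.1 - d) (sb.1.1 + d + 1) 1),
         if sb.2.2 = y then PySem.Set.add st.2.2 sb.2.1 else st.2.2) := by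
      simp only [AStep, hdelta, map_add_pyRange]
    have hB : BStep y st sb =
        (st.1 ++ ints (st.2.1.foldl (fun segs cut => segs.flatMap (fun s => pySubtract s cut))
            [(sb.1.1 - d, sb.1.1 + d)]),
         st.2.1 ++ [(sb.1.1 - d, sb.1.1 + d)],
         if sb.2.2 = y then PySem.Set.add st.2.2 sb.2.1 else st.2.2) := by
      simp only [BStep, ← hddef, if_pos hd, ints]
    have hupd : PySem.Set.update st.1 (PySem.List.pyRange (sb.1.1 - d) (sb.1.1 + d + 1) 1) =
        st.1 ++ (PySem.List.pyRange (sb.1.1 - d) (sb.1.1 + d + 1) 1).filter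
          (fun x => !(PySem.Set.contains st.1 x)) := by
      rw [PySem.Set.update_eq_append_filter,
        PySem.Set.ofList_eq_self_of_nodup _ (PySem.List.nodup_pyRange_one _ _)]
    have hlists := step_lists st.1 st.2.1 (sb.1.1 - d) (sb.1.1 + d) (by omega) hseen hmem
    have hreseq : PySem.Set.update st.1 (PySem.List.pyRange (sb.1.1 - d) (sb.1.1 + d + 1) 1) =
        st.1 ++ ints (st.2.1.foldl (fun segs cut => segs.flatMap (fun s => pySubtract s cut))
          [(sb.1.1 - d, sb.1.1 + d)]) := by
      rw [hupd, hlists]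
    constructor
    · rw [hA, hB, hreseq]
    · rw [hB]
      refine ⟨?_, ?_, ?_⟩
      · have := PySem.Set.nodup_update (s := st.1) (xs := PySem.List.pyRange (sb.1.1 - d) (sb.1.1 + d + 1) 1) hnd
        rw [hreseq] at this
        exact this
      · intro x
        show x ∈ st.1 ++ _ ↔ _
        rw [← hreseq]
        rw [show (PySem.Set.update st.1 (PySem.List.pyRange (sb.1.1 - d) (sb.1.1 + d + 1) 1) : List Int) = PySem.Set.update st.1 (PySem.List.pyRange (sb.1.1 - d) (sb.1.1 + d + 1) 1) from rfl]
        rw [PySem.Set.mem_update, hmem x, PySem.List.mem_pyRange_one]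
        simp only [List.mem_append, List.mem_singleton]
        constructor
        · rintro (⟨c, hc, hcx⟩ | hx)
          · exact ⟨c, Or.inl hc, hcx⟩
          · exact ⟨(sb.1.1 - d, sb.1.1 + d), Or.inr rfl, by constructor <;> omega⟩
        · rintro ⟨c, hc | hc, hcx⟩
          · exact Or.inl ⟨c, hc, hcx⟩
          · subst hc; right; constructor <;> omega
      · intro c hc
        rcases List.mem_append.1 hc with hc | hc
        · exact hseen c hc
        · rw [List.mem_singleton] at hc; subst hc; simp; omega
  case neg =>
    have hAe : AStep y (st.1, st.2.2) sb = (st.1, if sb.2.2 = y then PySem.Set.add st.2.2 sb.2.1 else st.2.2) := by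
      simp only [AStep, hdelta]
      rw [PySem.List.pyRange_one_eq_nil (by omega)]
      simp [PySem.Set.update_nil]
    have hBe : BStep y st sb = (st.1, st.2.1, if sb.2.2 = y then PySem.Set.add st.2.2 sb.2.1 else st.2.2) := by
      simp only [BStep, if_neg hd]
    rw [hAe, hBe]
    exact ⟨rfl, hnd, hmem, hseen⟩

lemma main_fold (y : Int) (data : List ((Int × Int) × (Int × Int)))
    (st : List Int × List (Int × Int) × PySem.Set Int) (h : InvB st) :
    data.foldl (AStep y) (st.1, st.2.2) =
      ((data.foldl (BStep y) st).1, (data.foldl (BStep y) st).2.2) ∧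
      InvB (data.foldl (BStep y) st) := by
  induction data generalizing st with
  | nil => exact ⟨rfl, h⟩
  | cons sb rest ih =>
    obtain ⟨he, hinv⟩ := step_ok y sb st h
    rw [List.foldl_cons, List.foldl_cons, he]
    exact ih (BStep y st sb) hinv

theorem find_empty_by_y_spec : Claim_equal_find_empty_by_y := by
  intro data y _
  show find_empty_by_y data y = find_empty_by_y_alt data y
  have hA : find_empty_by_y data y = data.foldl (AStep y) ([], []) := rfl
  have hB : find_empty_by_y_alt data y =
      ((PySem.Set.ofList (data.foldl (BStep y) ([], [], [])).1),
       (data.foldl (BStep y) ([], [], [])).2.2) := rfl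
  have h0 : InvB ([], [], []) := ⟨List.nodup_nil, by simp, by simp⟩
  obtain ⟨he, hinv⟩ := main_fold y data ([], [], []) h0
  rw [hA, hB, he, PySem.Set.ofList_eq_self_of_nodup _ hinv.1]
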